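-- pv_equiv track=rewrite | github.com/Kdelphinus/Python_study | Programmers/완전탐색/1. 모의고사.py | solution
-- ===== SOURCE A (Python) =====
-- def solution(answers):
--     answer_1 = []
--     answer_2 = []
--     answer_3 = []
--
--     cnt = 0
--     cnt_1 = 0
--     cnt_2 = 0
--     cnt_3 = 0
--
--     # 1번 학생의 답
--     for i in range(len(answers)):
--         answer_1.append(i % 5 + 1)
--
--     # 2번 학생의 답
--     for i in range(len(answers)):
--         if i % 2 != 0:
--             cnt += 1
--             if cnt == 2:
--                 cnt += 1
--                 answer_2.append(cnt)
--             elif cnt == 5: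
--                 answer_2.append(cnt)
--                 cnt = 0
--             else:
--                 answer_2.append(cnt)
--         else:
--             answer_2.append(2)
--
--     # 3반 학생의 답
--     for i in range(len(answers)):
--         if i % 10 <= 1:
--             answer_3.append(3)
--         elif i % 10 <= 3:
--             answer_3.append(1)
--         elif i % 10 <= 5:
--             answer_3.append(2)
--         elif i % 10 <= 7:
--             answer_3.append(4)
--         else:
--             answer_3.append(5)
--
--     # 채점
--     for i in range(len(answers)):
--         if answers[i] == answer_1[i]:
--             cnt_1 += 1
--         if answers[i] == answer_2[i]:
--             cnt_2 += 1
--         if answers[i] == answer_3[i]: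
--             cnt_3 += 1
--
--     # 출력
--     if cnt_1 > cnt_2 and cnt_1 > cnt_3:
--         return [1]
--     elif cnt_2 > cnt_1 and cnt_2 > cnt_3:
--         return [2]
--     elif cnt_3 > cnt_2 and cnt_3 > cnt_1:
--         return [3]
--     elif cnt_1 == cnt_2 and cnt_1 > cnt_3:
--         return [1, 2]
--     elif cnt_1 == cnt_3 and cnt_1 > cnt_2:
--         return [1, 3]
--     elif cnt_3 == cnt_2 and cnt_2 > cnt_1:
--         return [2, 3]
--     else:
--         return [1, 2, 3]
-- ===== SOURCE B (Python) =====
-- def solution(answers):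
--     # Phase 1: one pass over answers builds a histogram keyed by (index mod 40, answer value)
--     # (40 = lcm of the three pattern periods 5, 8, 10), then the answers are never scanned again.
--     hist = {}
--     for i, a in enumerate(answers):
--         key = (i % 40, a)
--         hist[key] = hist.get(key, 0) + 1
--     # Phase 2: score each student from the 40-entry histogram alone.
--     patterns = [[1, 2, 3, 4, 5], [2, 1, 2, 3, 2, 4, 2, 5], [3, 3, 1, 1, 2, 2, 4, 4, 5, 5]]
--     scores = [sum(hist.get((r, p[r % len(p)]), 0) for r in range(40)) for p in patterns]
--     best = max(scores)
--     return [k + 1 for k in range(3) if scores[k] == best]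
-- ===== Notes on version B (the rewrite author's own statement) =====
-- stated objective: alternative
-- what changed: B replaces A's three materialized full-length answer lists and per-index comparison pass by a two-phase algorithm: one pass builds a histogram keyed by (index mod 40, answer) -- 40 = lcm of the pattern periods -- and each student's score is then computed from the 40-bucket histogram alone, never re-reading the answers; the 7-branch tie cascade becomes max() plus a comprehension.
import Mathlib
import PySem

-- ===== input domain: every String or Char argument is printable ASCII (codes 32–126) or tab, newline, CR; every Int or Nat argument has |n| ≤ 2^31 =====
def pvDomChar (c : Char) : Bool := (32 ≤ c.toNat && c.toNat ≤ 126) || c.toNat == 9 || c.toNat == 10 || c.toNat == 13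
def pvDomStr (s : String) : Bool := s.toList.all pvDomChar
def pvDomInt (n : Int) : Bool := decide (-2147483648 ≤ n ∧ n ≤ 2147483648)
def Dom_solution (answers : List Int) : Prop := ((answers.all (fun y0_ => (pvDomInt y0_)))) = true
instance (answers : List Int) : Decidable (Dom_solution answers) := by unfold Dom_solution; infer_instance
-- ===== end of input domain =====

-- B is a two-phase alternative: one pass builds a histogram keyed by (index mod 40, answer)
-- (40 = lcm of the pattern periods 5, 8, 10); scores are then computed from the 40-bucket
-- histogram alone without re-reading the answers, and winners are picked by max + comprehension.

-- ===== PORT A =====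
-- indexing answers[i] / answer_k[i] is ported as .getD i 0: every index i comes from
-- range(len(answers)) and all lists have that length, so it is always in range (exact).
def solution (answers : List Int) : List Int :=
  let n := answers.length
  -- 1번 학생의 답
  let answer1 : List Int := (List.range n).foldl (fun acc i => acc ++ [(Int.ofNat i % 5 + 1)]) []
  -- 2번 학생의 답 (cnt state threaded through the loop)
  let s2 : Int × List Int := (List.range n).foldl (fun s i =>
      if i % 2 ≠ 0 then
        let cnt := s.1 + 1
        if cnt = 2 then (cnt + 1, s.2 ++ [cnt + 1])
        else if cnt = 5 then (0, s.2 ++ [cnt])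
        else (cnt, s.2 ++ [cnt])
      else (s.1, s.2 ++ [2])) (0, [])
  let answer2 := s2.2
  -- 3반 학생의 답
  let answer3 : List Int := (List.range n).foldl (fun acc i =>
      if i % 10 ≤ 1 then acc ++ [3]
      else if i % 10 ≤ 3 then acc ++ [1]
      else if i % 10 ≤ 5 then acc ++ [2]
      else if i % 10 ≤ 7 then acc ++ [4]
      else acc ++ [5]) []
  -- 채점
  let c : Int × Int × Int := (List.range n).foldl (fun c i =>
      let c1 := if answers.getD i 0 = answer1.getD i 0 then c.1 + 1 else c.1
      let c2 := if answers.getD i 0 = answer2.getD i 0 then c.2.1 + 1 else c.2.1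
      let c3 := if answers.getD i 0 = answer3.getD i 0 then c.2.2 + 1 else c.2.2
      (c1, c2, c3)) (0, 0, 0)
  let cnt1 := c.1
  let cnt2 := c.2.1
  let cnt3 := c.2.2
  -- 출력
  if cnt1 > cnt2 ∧ cnt1 > cnt3 then [1]
  else if cnt2 > cnt1 ∧ cnt2 > cnt3 then [2]
  else if cnt3 > cnt2 ∧ cnt3 > cnt1 then [3]
  else if cnt1 = cnt2 ∧ cnt1 > cnt3 then [1, 2]
  else if cnt1 = cnt3 ∧ cnt1 > cnt2 then [1, 3]
  else if cnt3 = cnt2 ∧ cnt2 > cnt1 then [2, 3]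
  else [1, 2, 3]

-- ===== PORT B =====
def solution_alt (answers : List Int) : List Int :=
  -- phase 1: histogram keyed by (i % 40, a)
  let hist : PySem.Dict (Int × Int) Int :=
    (PySem.List.enumerate answers 0).foldl (fun d p =>
      let key := (PySem.Int.mod p.1 40, p.2)
      d.insert key (d.getD key 0 + 1)) PySem.Dict.empty
  -- phase 2: score each pattern from the histogram alone
  let patterns : List (List Int) := [[1, 2, 3, 4, 5], [2, 1, 2, 3, 2, 4, 2, 5], [3, 3, 1, 1, 2, 2, 4, 4, 5, 5]]
  let scores : List Int := patterns.map (fun p =>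
    ((PySem.List.pyRange 0 40 1).map (fun r =>
      hist.getD (r, PySem.List.pyGetD p (PySem.Int.mod r (p.length : Int)) 0) 0)).sum)
  let best : Int := (PySem.List.max? scores (fun x => x)).getD 0
  ((PySem.List.pyRange 0 3 1).filter (fun k => PySem.List.pyGetD scores k 0 = best)).map (fun k => k + 1)

-- ===== PRECONDITION & SPEC =====
def Spec_solution (answers : List Int) (out : List Int) : Prop := out = solution_alt answers
instance (answers : List Int) (out : List Int) : Decidable (Spec_solution answers out) := by unfold Spec_solution; infer_instance

-- ===== CLAIM (what is proved, stated in full; the proofs are below) =====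
def Claim_equal_solution : Prop := ∀ (answers : List Int), Dom_solution answers → Spec_solution answers (solution answers)

-- ===== LEMMAS AND PROOFS =====

-- the three per-index pattern values, as functions of the (Nat) index
def pat1 : List Int := [1, 2, 3, 4, 5]
def pat2 : List Int := [2, 1, 2, 3, 2, 4, 2, 5]
def pat3 : List Int := [3, 3, 1, 1, 2, 2, 4, 4, 5, 5]
def f1 (i : Nat) : Int := pat1.getD (i % 5) 0
def f2 (i : Nat) : Int := pat2.getD (i % 8) 0
def f3 (i : Nat) : Int := pat3.getD (i % 10) 0

-- A's cnt state before processing index n of the answer_2 loop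
def cst (n : Nat) : Int := ([0, 0, 1, 1, 3, 3, 4, 4] : List Int).getD (n % 8) 0

def cntP (p : Nat → Bool) (n : Nat) : Int := (((List.range n).filter p).length : Int)

-- the common selection: all max-scoring students, ascending
def pick (c1 c2 c3 : Int) : List Int :=
  (if c1 = max (max c1 c2) c3 then [1] else []) ++
    (if c2 = max (max c1 c2) c3 then [2] else []) ++
    (if c3 = max (max c1 c2) c3 then [3] else [])

theorem cntP_cons (p : Nat → Bool) (n : Nat) :
    cntP p (n + 1) = (if p 0 then 1 else 0) + cntP (fun j => p (j + 1)) n := by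
  simp only [cntP, List.range_succ_eq_map, List.filter_cons]
  rw [List.filter_map]
  cases h : p 0 <;> simp [h, Function.comp_def] <;> omega

theorem cntP_succ (p : Nat → Bool) (n : Nat) :
    cntP p (n + 1) = cntP p n + (if p n then 1 else 0) := by
  simp [cntP, List.range_succ, List.filter_append, List.filter_cons]
  split <;> simp [*]

theorem f1_eq (i : Nat) : (Int.ofNat i % 5 + 1) = f1 i := by
  show ((i : Int) % 5 + 1) = f1 i
  have h5 : i % 5 < 5 := Nat.mod_lt _ (by omega)
  have hc : ((i : Int) % 5) = ((i % 5 : Nat) : Int) := by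
    rw [Int.natCast_mod]; norm_num
  rw [hc]
  set k := i % 5 with hk
  interval_cases k <;> (unfold f1; rw [← hk]; rfl)

theorem body3_eq (acc : List Int) (i : Nat) :
    (if i % 10 ≤ 1 then acc ++ [(3:Int)]
     else if i % 10 ≤ 3 then acc ++ [1]
     else if i % 10 ≤ 5 then acc ++ [2]
     else if i % 10 ≤ 7 then acc ++ [4]
     else acc ++ [5]) = acc ++ [f3 i] := by
  have h : i % 10 < 10 := Nat.mod_lt _ (by omega)
  unfold f3
  set k := i % 10 with hk
  interval_cases k <;> simp [pat3]

theorem getD_map_range {n i : Nat} (f : Nat → Int) (h : i < n) :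
    ((List.range n).map f).getD i 0 = f i := by
  rw [List.getD_eq_getElem?_getD]
  simp [List.getElem?_map, List.getElem?_range, h]

theorem foldl_snoc (f : Nat → Int) (l : List Nat) (acc : List Int) :
    l.foldl (fun a i => a ++ [f i]) acc = acc ++ l.map f := by
  induction l generalizing acc with
  | nil => simp
  | cons x t ih => simp [ih]

theorem foldl_snoc_nil (f : Nat → Int) (l : List Nat) :
    l.foldl (fun a i => a ++ [f i]) [] = l.map f := by
  simpa using foldl_snoc f l []

theorem a2_inv (n : Nat) :
    (List.range n).foldl (fun (s : Int × List Int) i =>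
      if i % 2 ≠ 0 then
        let cnt := s.1 + 1
        if cnt = 2 then (cnt + 1, s.2 ++ [cnt + 1])
        else if cnt = 5 then (0, s.2 ++ [cnt])
        else (cnt, s.2 ++ [cnt])
      else (s.1, s.2 ++ [2])) (0, []) = (cst n, (List.range n).map f2) := by
  induction n with
  | zero => simp [cst]
  | succ n ih =>
    rw [List.range_succ, List.foldl_append, ih, List.map_append]
    have h8 : n % 8 < 8 := Nat.mod_lt _ (by omega)
    set r := n % 8 with hr
    interval_cases r <;>
      (first
        | (have h2 : n % 2 = 0 := by omega
           have h81 : (n + 1) % 8 = (n % 8 + 1) % 8 := by omega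
           simp [cst, f2, pat2, h2, h81, ← hr])
        | (have h2 : n % 2 = 1 := by omega
           have h81 : (n + 1) % 8 = (n % 8 + 1) % 8 := by omega
           simp [cst, f2, pat2, h2, h81, ← hr]))

theorem scoreA (ans l1 l2 l3 : List Int) (g1 g2 g3 : Nat → Int) :
    ∀ n, (∀ i < n, l1.getD i 0 = g1 i) → (∀ i < n, l2.getD i 0 = g2 i) →
      (∀ i < n, l3.getD i 0 = g3 i) →
    (List.range n).foldl (fun (c : Int × Int × Int) i =>
        (if ans.getD i 0 = l1.getD i 0 then c.1 + 1 else c.1,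
         if ans.getD i 0 = l2.getD i 0 then c.2.1 + 1 else c.2.1,
         if ans.getD i 0 = l3.getD i 0 then c.2.2 + 1 else c.2.2)) (0, 0, 0)
      = (cntP (fun i => decide (ans.getD i 0 = g1 i)) n,
         cntP (fun i => decide (ans.getD i 0 = g2 i)) n,
         cntP (fun i => decide (ans.getD i 0 = g3 i)) n) := by
  intro n
  induction n with
  | zero => intro _ _ _; simp [cntP]
  | succ n ih =>
    intro h1 h2 h3
    rw [List.range_succ, List.foldl_append,
        ih (fun i hi => h1 i (by omega)) (fun i hi => h2 i (by omega)) (fun i hi => h3 i (by omega))]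
    simp only [List.foldl_cons, List.foldl_nil, cntP_succ, Prod.mk.injEq]
    rw [h1 n (by omega), h2 n (by omega), h3 n (by omega)]
    refine ⟨?_, ?_, ?_⟩ <;> (split <;> simp_all [List.getD_eq_getElem?_getD])

theorem selA (c1 c2 c3 : Int) :
    (if c1 > c2 ∧ c1 > c3 then ([1] : List Int)
     else if c2 > c1 ∧ c2 > c3 then [2]
     else if c3 > c2 ∧ c3 > c1 then [3]
     else if c1 = c2 ∧ c1 > c3 then [1, 2]
     else if c1 = c3 ∧ c1 > c2 then [1, 3]
     else if c3 = c2 ∧ c2 > c1 then [2, 3]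
     else [1, 2, 3]) = pick c1 c2 c3 := by
  unfold pick
  simp only [max_def]
  split_ifs <;> first | rfl | omega

-- ===== B-side lemmas =====

-- the histogram fold, looked up: a countP over the enumerated list
theorem getD_histfold (e : List (Int × Int)) (d : PySem.Dict (Int × Int) Int) (c : Int × Int) :
    (e.foldl (fun d p =>
        d.insert (PySem.Int.mod p.1 40, p.2) (d.getD (PySem.Int.mod p.1 40, p.2) 0 + 1)) d).getD c 0
      = d.getD c 0 + (e.countP (fun p => decide ((PySem.Int.mod p.1 40, p.2) = c)) : Int) := by
  induction e generalizing d with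
  | nil => simp
  | cons p t ih =>
    rw [List.foldl_cons, ih, List.countP_cons, PySem.Dict.getD_insert]
    by_cases h : c = (PySem.Int.mod p.1 40, p.2)
    · subst h
      rw [if_pos rfl]
      simp only [decide_eq_true_eq, if_pos rfl]
      push_cast
      ring
    · have h' : ¬ ((PySem.Int.mod p.1 40, p.2) = c) := fun hc => h hc.symm
      rw [if_neg h]
      simp only [h', decide_eq_true_eq, if_false]
      push_cast
      ring

-- exchange a sum of counts over r with a sum over the list
theorem swap_sum (R : List Int) (e : List (Int × Int)) (q : Int → (Int × Int) → Bool) :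
    (R.map (fun r => ((e.countP (q r)) : Int))).sum
      = (e.map (fun p => ((R.countP (fun r => q r p)) : Int))).sum := by
  induction e with
  | nil => simp
  | cons p t ih =>
    simp only [List.countP_cons, List.map_cons, List.sum_cons]
    push_cast
    rw [PySem.List.sum_map_add_int, ih, PySem.List.sum_map_ite_one_zero]
    ring

-- a predicate that pins its argument to r0 counts 0 or 1 on a Nodup list containing r0
theorem countP_single (R : List Int) (hnd : R.Nodup) (r0 : Int) (hr : r0 ∈ R)
    (p : Int → Bool) (h : ∀ r, p r = true → r = r0) :
    R.countP p = if p r0 then 1 else 0 := by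
  induction R with
  | nil => cases hr
  | cons a t ih =>
    rw [List.countP_cons]
    rcases List.mem_cons.mp hr with rfl | hrt
    · have ht : t.countP p = 0 := by
        rw [List.countP_eq_zero]
        intro x hx hpx
        exact (List.nodup_cons.mp hnd).1 ((h x hpx) ▸ hx)
      rw [ht]; split <;> simp [*]
    · have ha : p a = false := by
        by_contra hpa
        have : a = r0 := h a (by simpa using hpa)
        exact (List.nodup_cons.mp hnd).1 (this ▸ hrt)
      rw [ih (List.nodup_cons.mp hnd).2 hrt, ha]
      simp

-- per-element: counting matching r over range(40) is the match indicator
theorem inner_count (s : Nat) (a : Int) (g : Int → Int) :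
    ((PySem.List.pyRange 0 40 1).countP
        (fun r => decide ((PySem.Int.mod (s : Int) 40, a) = (r, g r))) : Int)
      = if a = g (((s % 40 : Nat) : Int)) then 1 else 0 := by
  have hm : PySem.Int.mod (s : Int) 40 = ((s % 40 : Nat) : Int) := by
    have : ((40 : Nat) : Int) = (40 : Int) := by norm_num
    rw [← this, PySem.Int.mod_natCast]
  have hmem : ((s % 40 : Nat) : Int) ∈ PySem.List.pyRange 0 40 1 := by
    rw [PySem.List.mem_pyRange_one]
    constructor
    · positivity
    · exact_mod_cast Nat.mod_lt s (by omega)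
  rw [countP_single (PySem.List.pyRange 0 40 1) (PySem.List.nodup_pyRange_one 0 40)
        ((s % 40 : Nat) : Int) hmem _
        (by intro r hx; simp only [decide_eq_true_eq, Prod.mk.injEq, hm] at hx; exact hx.1.symm)]
  rw [hm]
  by_cases ha : a = g (((s % 40 : Nat) : Int)) <;> simp [Prod.mk.injEq, ha]

-- the enumerated indicator sum is the per-index count
theorem bridge (g : Int → Int) :
    ∀ (l : List Int) (s : Nat),
    ((PySem.List.enumerate l (s : Int)).map (fun p =>
        (((PySem.List.pyRange 0 40 1).countP
            (fun r => decide ((PySem.Int.mod p.1 40, p.2) = (r, g r)))) : Int))).sum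
      = cntP (fun j => decide (l.getD j 0 = g ((((s + j) % 40 : Nat) : Int)))) l.length := by
  intro l
  induction l with
  | nil => intro s; simp [cntP]
  | cons a t ih =>
    intro s
    rw [PySem.List.enumerate_cons, List.map_cons, List.sum_cons]
    have hs1 : (s : Int) + 1 = ((s + 1 : Nat) : Int) := by push_cast; ring
    rw [hs1, ih (s + 1)]
    simp only [List.length_cons]
    rw [cntP_cons]
    congr 1
    · rw [inner_count s a g]
      have : s + 0 = s := by omega
      simp [this]
    · congr 1
      funext j
      have : s + (j + 1) = (s + 1) + j := by omega
      simp [this]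

-- one score from the histogram equals the per-index cyclic count
theorem score_eq (answers : List Int) (p : List Int) (f : Nat → Int)
    (hf : ∀ i : Nat, PySem.List.pyGetD p (PySem.Int.mod (((i % 40 : Nat) : Int)) (p.length : Int)) 0 = f i) :
    ((PySem.List.pyRange 0 40 1).map (fun r =>
        ((PySem.List.enumerate answers 0).foldl (fun d q =>
            d.insert (PySem.Int.mod q.1 40, q.2) (d.getD (PySem.Int.mod q.1 40, q.2) 0 + 1))
          PySem.Dict.empty).getD
          (r, PySem.List.pyGetD p (PySem.Int.mod r (p.length : Int)) 0) 0)).sum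
      = cntP (fun i => decide (answers.getD i 0 = f i)) answers.length := by
  have h1 : ∀ r : Int,
      ((PySem.List.enumerate answers 0).foldl (fun d q =>
            d.insert (PySem.Int.mod q.1 40, q.2) (d.getD (PySem.Int.mod q.1 40, q.2) 0 + 1))
          PySem.Dict.empty).getD (r, PySem.List.pyGetD p (PySem.Int.mod r (p.length : Int)) 0) 0
        = ((PySem.List.enumerate answers 0).countP
            (fun q => decide ((PySem.Int.mod q.1 40, q.2)
              = (r, PySem.List.pyGetD p (PySem.Int.mod r (p.length : Int)) 0))) : Int) := by
    intro r
    rw [getD_histfold]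
    simp
  calc ((PySem.List.pyRange 0 40 1).map (fun r =>
        ((PySem.List.enumerate answers 0).foldl (fun d q =>
            d.insert (PySem.Int.mod q.1 40, q.2) (d.getD (PySem.Int.mod q.1 40, q.2) 0 + 1))
          PySem.Dict.empty).getD
          (r, PySem.List.pyGetD p (PySem.Int.mod r (p.length : Int)) 0) 0)).sum
      = ((PySem.List.pyRange 0 40 1).map (fun r =>
          ((PySem.List.enumerate answers 0).countP
            (fun q => decide ((PySem.Int.mod q.1 40, q.2)
              = (r, PySem.List.pyGetD p (PySem.Int.mod r (p.length : Int)) 0))) : Int))).sum := by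
        exact congrArg List.sum (List.map_congr_left (fun r _ => h1 r))
    _ = ((PySem.List.enumerate answers 0).map (fun q =>
          (((PySem.List.pyRange 0 40 1).countP
            (fun r => decide ((PySem.Int.mod q.1 40, q.2)
              = (r, PySem.List.pyGetD p (PySem.Int.mod r (p.length : Int)) 0)))) : Int))).sum := by
        exact swap_sum _ _ _
    _ = cntP (fun j => decide (answers.getD j 0 = f j)) answers.length := by
        have hb := bridge (fun r => PySem.List.pyGetD p (PySem.Int.mod r (p.length : Int)) 0) answers 0
        rw [Nat.cast_zero] at hb
        simp only [Nat.zero_add] at hb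
        rw [hb]
        congr 1
        funext j
        rw [hf j]

theorem hf1 (i : Nat) :
    PySem.List.pyGetD [1, 2, 3, 4, 5] (PySem.Int.mod (((i % 40 : Nat) : Int)) ((([1, 2, 3, 4, 5] : List Int).length : Nat) : Int)) 0 = f1 i := by
  have hl : ((([1, 2, 3, 4, 5] : List Int).length : Nat) : Int) = ((5 : Nat) : Int) := by norm_num
  rw [hl, PySem.Int.mod_natCast, PySem.List.pyGetD_natCast]
  unfold f1 pat1
  rw [Nat.mod_mod_of_dvd i (by norm_num)]

theorem hf2 (i : Nat) :
    PySem.List.pyGetD [2, 1, 2, 3, 2, 4, 2, 5] (PySem.Int.mod (((i % 40 : Nat) : Int)) ((([2, 1, 2, 3, 2, 4, 2, 5] : List Int).length : Nat) : Int)) 0 = f2 i := by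
  have hl : ((([2, 1, 2, 3, 2, 4, 2, 5] : List Int).length : Nat) : Int) = ((8 : Nat) : Int) := by norm_num
  rw [hl, PySem.Int.mod_natCast, PySem.List.pyGetD_natCast]
  unfold f2 pat2
  rw [Nat.mod_mod_of_dvd i (by norm_num)]

theorem hf3 (i : Nat) :
    PySem.List.pyGetD [3, 3, 1, 1, 2, 2, 4, 4, 5, 5] (PySem.Int.mod (((i % 40 : Nat) : Int)) ((([3, 3, 1, 1, 2, 2, 4, 4, 5, 5] : List Int).length : Nat) : Int)) 0 = f3 i := by
  have hl : ((([3, 3, 1, 1, 2, 2, 4, 4, 5, 5] : List Int).length : Nat) : Int) = ((10 : Nat) : Int) := by norm_num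
  rw [hl, PySem.Int.mod_natCast, PySem.List.pyGetD_natCast]
  unfold f3 pat3
  rw [Nat.mod_mod_of_dvd i (by norm_num)]

-- B's tail (scores literal, max, comprehension) is pick
theorem selB (c1 c2 c3 : Int) :
    ((PySem.List.pyRange 0 3 1).filter (fun k =>
        PySem.List.pyGetD [c1, c2, c3] k 0 = (PySem.List.max? [c1, c2, c3] (fun x => x)).getD 0)).map
      (fun k => k + 1) = pick c1 c2 c3 := by
  have hR : PySem.List.pyRange 0 3 1 = [0, 1, 2] := by decide
  have hmax : PySem.List.max? [c1, c2, c3] (fun x => x) = some (max (max c1 c2) c3) := by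
    rw [PySem.List.max?_id_cons]
    simp [List.foldl]
  have g0 : PySem.List.pyGetD [c1, c2, c3] (0 : Int) 0 = c1 := rfl
  have g1 : PySem.List.pyGetD [c1, c2, c3] (1 : Int) 0 = c2 := rfl
  have g2 : PySem.List.pyGetD [c1, c2, c3] (2 : Int) 0 = c3 := rfl
  rw [hR, hmax]
  simp only [List.filter_cons, List.filter_nil, g0, g1, g2, Option.getD_some, decide_eq_true_eq]
  unfold pick
  split_ifs <;> rfl

-- ===== VERDICT (by name: the statement is the Claim_ definition above) =====
theorem solution_spec : Claim_equal_solution := by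
  intro answers _
  unfold Spec_solution solution solution_alt
  dsimp only
  rw [foldl_snoc_nil, a2_inv]
  have hb3 : (fun (acc : List Int) (i : Nat) =>
      if i % 10 ≤ 1 then acc ++ [(3:Int)]
      else if i % 10 ≤ 3 then acc ++ [1]
      else if i % 10 ≤ 5 then acc ++ [2]
      else if i % 10 ≤ 7 then acc ++ [4]
      else acc ++ [5]) = fun acc i => acc ++ [f3 i] := by
    funext acc i; exact body3_eq acc i
  rw [hb3, foldl_snoc_nil]
  have h1 : ∀ i < answers.length,
      ((List.range answers.length).map (fun i => Int.ofNat i % 5 + 1)).getD i 0 = f1 i :=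
    fun i hi => by rw [getD_map_range _ hi]; exact f1_eq i
  have h2 : ∀ i < answers.length,
      ((List.range answers.length).map f2).getD i 0 = f2 i :=
    fun i hi => getD_map_range _ hi
  have h3 : ∀ i < answers.length,
      ((List.range answers.length).map f3).getD i 0 = f3 i :=
    fun i hi => getD_map_range _ hi
  rw [scoreA answers _ _ _ f1 f2 f3 answers.length h1 h2 h3]
  dsimp only
  rw [List.map_cons, List.map_cons, List.map_cons, List.map_nil]
  rw [score_eq answers [1, 2, 3, 4, 5] f1 hf1, score_eq answers [2, 1, 2, 3, 2, 4, 2, 5] f2 hf2,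
      score_eq answers [3, 3, 1, 1, 2, 2, 4, 4, 5, 5] f3 hf3]
  rw [selA, selB]
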